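-- pv_equiv track=rewrite | github.com/weishuzhao/MT-SwBw | data/nxrAB/extract.py | assign_unipprt_fa_features
-- ===== SOURCE A (Python) =====
-- def assign_unipprt_fa_features(
--     headline=">ref_narH|tr|X5L138|X5L138_9MYCO Nitrate reductase subunit beta OS=Mycolicibacterium mageritense DSM 44476 = CIP 104973 OX=1209984 GN=narH PE=4 SV=1",
-- ):
--     features: dict[str, str] = {}
--     if headline.startswith(">"):
--         headline = headline[1:]
--     headline = headline.strip()
--     seqid, remain = headline.split(maxsplit=1)
--     features["id"] = seqid
--     key = "desc"
--     while "=" in remain: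
--         value_, remain = remain.split("=", 1)
--         while value_[-1] == " " or remain[0] == " ":
--             remain_, remain = remain.split("=", 1)
--             value_ = value_ + "=" + remain_
--         features[key], key = value_.rsplit(maxsplit=1)
--     features[key] = remain
--     return features
-- ===== SOURCE B (Python) =====
-- def assign_unipprt_fa_features(
--     headline=">ref_narH|tr|X5L138|X5L138_9MYCO Nitrate reductase subunit beta OS=Mycolicibacterium mageritense DSM 44476 = CIP 104973 OX=1209984 GN=narH PE=4 SV=1",
-- ):
--     if headline.startswith(">"):
--         headline = headline[1:]
--     headline = headline.strip()
--     seqid, remain = headline.split(maxsplit=1)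
--     features: dict[str, str] = {"id": seqid}
--     key = "desc"
--     parts = remain.split("=")
--     seg = parts[0]
--     for nxt in parts[1:]:
--         if seg.endswith(" ") or nxt.startswith(" "):
--             seg = seg + "=" + nxt
--         else:
--             features[key], key = seg.rsplit(maxsplit=1)
--             seg = nxt
--     features[key] = seg
--     return features
-- ===== Notes on version B (the rewrite author's own statement) =====
-- stated objective: simpler
-- what changed: A's nested while-loops that repeatedly re-split the remainder with split('=', 1) (and re-scan it with 'in') are replaced by a single remain.split('=') followed by one accumulator pass over the fragments that re-joins a fragment when a space is adjacent to the '=' and otherwise closes the segment with rsplit.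
-- outside the precondition, e.g. on assign_unipprt_fa_features('='): A raises ValueError, B raises ValueError
import Mathlib
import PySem

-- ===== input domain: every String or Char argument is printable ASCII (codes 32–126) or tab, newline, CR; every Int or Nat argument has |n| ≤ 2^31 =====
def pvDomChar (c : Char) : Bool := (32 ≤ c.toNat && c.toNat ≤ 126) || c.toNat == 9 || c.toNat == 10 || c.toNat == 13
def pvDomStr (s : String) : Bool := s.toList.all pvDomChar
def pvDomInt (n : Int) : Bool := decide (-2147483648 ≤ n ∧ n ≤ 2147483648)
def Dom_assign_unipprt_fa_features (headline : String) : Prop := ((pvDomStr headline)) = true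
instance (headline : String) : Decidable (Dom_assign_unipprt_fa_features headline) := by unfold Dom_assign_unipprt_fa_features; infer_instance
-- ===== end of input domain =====

-- B replaces A's nested while-loops of repeated split("=", 1) re-scans by one split("=") followed by a
-- single accumulator pass over the fragments (objective: simpler; same return value on every input in Pre_).

-- shared primitive: value_.rsplit(maxsplit=1) — Python-exact hand port (PySem has no rsplit with maxsplit);
-- both Pythons call exactly this standard-library method.
def pvRsplit1 (cs : List Char) : List (List Char) :=
  let rev := (PySem.Chars.rstrip cs).reverse
  let tok := rev.takeWhile (fun c => !PySem.Chars.isspace c)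
  let rem := (rev.dropWhile (fun c => !PySem.Chars.isspace c)).dropWhile (fun c => PySem.Chars.isspace c)
  if tok = [] then []
  else if rem = [] then [tok.reverse]
  else [rem.reverse, tok.reverse]

-- ===== PORT A =====
-- inner `while value_[-1] == " " or remain[0] == " "` loop (fuel = totality guard only; none = exception)
def pvInnerA : Nat → List Char → List Char → Option (List Char × List Char)
  | 0, _, _ => none
  | fuel+1, value_, remain =>
    -- Python's short-circuit condition: value_[-1] first (IndexError if empty), then remain[0]
    let cond : Option Bool :=
      match PySem.List.pyGet? value_ (-1) with
      | none => none
      | some c => if c = ' ' then some true else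
          match PySem.List.pyGet? remain 0 with
          | none => none
          | some c2 => some (c2 = ' ')
    match cond with
    | none => none
    | some true =>
      match PySem.Chars.splitOnMax remain ['='] 1 with
      | [r_, rest] => pvInnerA fuel (value_ ++ '=' :: r_) rest
      | _ => none      -- ValueError: no "=" left to split on
    | some false => some (value_, remain)

-- outer `while "=" in remain` loop
def pvLoopA : Nat → PySem.Dict (List Char) (List Char) → List Char → List Char →
    Option (PySem.Dict (List Char) (List Char))
  | 0, _, _, _ => none
  | fuel+1, features, key, remain =>
    if PySem.Chars.isIn ['='] remain then
      match PySem.Chars.splitOnMax remain ['='] 1 with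
      | [value_, r] =>
        match pvInnerA (r.length + 1) value_ r with
        | some (v2, r2) =>
          match pvRsplit1 v2 with
          | [a, b] => pvLoopA fuel (features.insert key a) b r2
          | _ => none  -- ValueError: rsplit did not give two values
        | none => none
      | _ => none
    else some (features.insert key remain)

def assign_unipprt_fa_features (headline : String) : List (String × String) :=
  let cs0 := headline.toList
  let cs1 := if PySem.Chars.startswith cs0 ['>'] then PySem.List.slice cs0 (some 1) none else cs0
  let cs := PySem.Chars.strip cs1
  match PySem.Chars.split₀Max cs 1 with
  | [seqid, remain] =>
    let f0 : PySem.Dict (List Char) (List Char) := (PySem.Dict.mk []).insert "id".toList seqid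
    match pvLoopA (remain.length + 1) f0 "desc".toList remain with
    | some f => f.items.map (fun kv => (String.ofList kv.1, String.ofList kv.2))
    | none => []        -- exception (outside Pre_)
  | _ => []             -- ValueError unpacking split (outside Pre_)

-- ===== PORT B =====
-- one pass over the "="-fragments with an accumulated segment
def pvGoB : PySem.Dict (List Char) (List Char) → List Char → List Char → List (List Char) →
    Option (PySem.Dict (List Char) (List Char))
  | f, key, seg, [] => some (f.insert key seg)
  | f, key, seg, nxt :: rest =>
    if PySem.Chars.endswith seg [' '] || PySem.Chars.startswith nxt [' '] then
      pvGoB f key (seg ++ '=' :: nxt) rest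
    else
      match pvRsplit1 seg with
      | [a, b] => pvGoB (f.insert key a) b nxt rest
      | _ => none       -- ValueError: rsplit did not give two values

def assign_unipprt_fa_features_alt (headline : String) : List (String × String) :=
  let cs0 := headline.toList
  let cs1 := if PySem.Chars.startswith cs0 ['>'] then PySem.List.slice cs0 (some 1) none else cs0
  let cs := PySem.Chars.strip cs1
  match PySem.Chars.split₀Max cs 1 with
  | [seqid, remain] =>
    let f0 : PySem.Dict (List Char) (List Char) := (PySem.Dict.mk []).insert "id".toList seqid
    match PySem.Chars.splitOn remain ['='] with
    | seg :: rest =>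
      match pvGoB f0 "desc".toList seg rest with
      | some f => f.items.map (fun kv => (String.ofList kv.1, String.ofList kv.2))
      | none => []      -- exception (outside Pre_)
    | [] => []          -- unreachable: str.split never returns an empty list
  | _ => []             -- ValueError unpacking split (outside Pre_)

-- ===== PRECONDITION & SPEC =====
-- Pre_ = exactly the inputs on which Python A returns normally (no exception): the stripped headline must
-- split into an id and a remainder, and each "=" boundary of the remainder must satisfy the local conditions
-- below (the last boundary is a separator, no empty fragment where an index is read, and every completed
-- segment rsplits into a value and a key).  Stated as boundary conditions on the "="-fragments of the
-- remainder; nothing that A returns on is excluded.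
def pvSplitEq : List Char → List (List Char)
  | [] => [[]]
  | c :: rest =>
    if c = '=' then [] :: pvSplitEq rest
    else match pvSplitEq rest with
         | x :: xs => (c :: x) :: xs
         | [] => [[c]]

def pvCond (p q : List Char) : Bool :=
  PySem.Chars.endswith p [' '] || PySem.Chars.startswith q [' ']

def pvBnd (ps : List (List Char)) (i : Nat) : Bool := pvCond (ps.getD i []) (ps.getD (i+1) [])

def pvStart (ps : List (List Char)) (s : Nat) : Bool := s == 0 || !pvBnd ps (s-1)

def pvSeg (ps : List (List Char)) (s i : Nat) : List Char :=
  PySem.Chars.join ['='] ((ps.drop s).take (i+1-s))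

def pvPreParts (ps : List (List Char)) : Bool :=
  ps.length == 1 ||
  ( !(ps.getD (ps.length-1) []).isEmpty
    && !pvBnd ps (ps.length-2)
    && (List.range (ps.length-1)).all (fun s => !pvStart ps s || !(ps.getD s []).isEmpty)
    && (List.range (ps.length-1)).all (fun s =>
         (List.range (ps.length-1)).all (fun i =>
           !(pvStart ps s && decide (s ≤ i) && (List.range (i-s)).all (fun d => pvBnd ps (s+d))
              && !pvBnd ps i)
           || (pvRsplit1 (pvSeg ps s i)).length == 2)))

def Pre_assign_unipprt_fa_features (headline : String) : Prop :=
  (let cs0 := headline.toList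
   let cs1 := if PySem.Chars.startswith cs0 ['>'] then PySem.List.slice cs0 (some 1) none else cs0
   let cs := PySem.Chars.strip cs1
   match PySem.Chars.split₀Max cs 1 with
   | [_, remain] => pvPreParts (pvSplitEq remain)
   | _ => false) = true

instance (headline : String) : Decidable (Pre_assign_unipprt_fa_features headline) := by
  unfold Pre_assign_unipprt_fa_features; infer_instance

def pvWitness_assign_unipprt_fa_features : String := ">x d OS=A = B OX=9"

def Spec_assign_unipprt_fa_features (headline : String) (out : List (String × String)) : Prop :=
  out = assign_unipprt_fa_features_alt headline
instance (headline : String) (out : List (String × String)) :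
    Decidable (Spec_assign_unipprt_fa_features headline out) := by
  unfold Spec_assign_unipprt_fa_features; infer_instance

-- ===== CLAIM (what is proved, stated in full; the proofs are below) =====
def Claim_equal_assign_unipprt_fa_features : Prop :=
  ∀ (headline : String), Dom_assign_unipprt_fa_features headline →
    Pre_assign_unipprt_fa_features headline →
    Spec_assign_unipprt_fa_features headline (assign_unipprt_fa_features headline)

-- ===== LEMMAS AND PROOFS =====

-- success invariant of A's run, on the state (accumulated segment, remaining fragments)
def pvOk : List Char → List (List Char) → Prop
  | _, [] => True
  | seg, nxt :: rest =>
    seg ≠ [] ∧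
    (if PySem.Chars.endswith seg [' '] then (rest ≠ [] ∧ pvOk (seg ++ '=' :: nxt) rest)
     else (nxt ≠ [] ∨ rest ≠ []) ∧
       (if PySem.Chars.startswith nxt [' '] then (rest ≠ [] ∧ pvOk (seg ++ '=' :: nxt) rest)
        else (pvRsplit1 seg).length = 2 ∧ pvOk nxt rest))

def pvConsHead (pre : List Char) : List (List Char) → List (List Char)
  | [] => [pre]
  | x :: xs => (pre ++ x) :: xs

theorem pvSplitEq_ne_nil (cs : List Char) : pvSplitEq cs ≠ [] := by
  cases cs with
  | nil => simp [pvSplitEq]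
  | cons c rest =>
    simp only [pvSplitEq]
    split
    · simp
    · split <;> simp_all

theorem joinEq_pvSplitEq (cs : List Char) :
    PySem.Chars.join ['='] (pvSplitEq cs) = cs := by
  induction cs with
  | nil => rfl
  | cons c rest ih =>
    simp only [pvSplitEq]
    split
    · subst_eqs
      rcases h : pvSplitEq rest with _ | ⟨x, xs⟩
      · exact absurd h (pvSplitEq_ne_nil rest)
      · rw [h] at ih
        simpa [PySem.Chars.join_cons_cons] using ih
    · rcases h : pvSplitEq rest with _ | ⟨x, xs⟩
      · exact absurd h (pvSplitEq_ne_nil rest)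
      · rw [h] at ih
        cases xs with
        | nil => simpa [PySem.Chars.join_singleton] using ih
        | cons y ys =>
          rw [PySem.Chars.join_cons_cons] at ih ⊢
          simpa using ih

theorem pvSplitEq_no_eq (cs : List Char) : ∀ p ∈ pvSplitEq cs, '=' ∉ p := by
  induction cs with
  | nil => simp [pvSplitEq]
  | cons c rest ih =>
    simp only [pvSplitEq]
    split
    · intro p hp
      rcases List.mem_cons.1 hp with h | h
      · simp [h]
      · exact ih p h
    · rcases h : pvSplitEq rest with _ | ⟨x, xs⟩
      · exact absurd h (pvSplitEq_ne_nil rest)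
      · rw [h] at ih
        intro p hp
        rcases List.mem_cons.1 hp with h2 | h2
        · subst h2
          intro hm
          rcases List.mem_cons.1 hm with h3 | h3
          · exact ‹¬c = '='› h3.symm
          · exact ih x (by simp) h3
        · exact ih p (by simp [h2])

theorem pvSplitEq_append (p r : List Char) (hp : '=' ∉ p) :
    pvSplitEq (p ++ r) = pvConsHead p (pvSplitEq r) := by
  induction p with
  | nil =>
    rcases h : pvSplitEq r with _ | ⟨x, xs⟩
    · exact absurd h (pvSplitEq_ne_nil r)
    · simp [pvConsHead, h]
  | cons c cs ih =>
    have hc : c ≠ '=' := by intro h; exact hp (by simp [h])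
    have hcs : '=' ∉ cs := fun h => hp (by simp [h])
    simp only [List.cons_append, pvSplitEq, if_neg hc, ih hcs]
    rcases h : pvSplitEq r with _ | ⟨x, xs⟩
    · exact absurd h (pvSplitEq_ne_nil r)
    · simp [pvConsHead]

theorem pvSplitEq_join (ps : List (List Char)) (h : ps ≠ []) (hno : ∀ p ∈ ps, '=' ∉ p) :
    pvSplitEq (PySem.Chars.join ['='] ps) = ps := by
  induction ps with
  | nil => simp at h
  | cons p rest ih =>
    cases rest with
    | nil =>
      rw [PySem.Chars.join_singleton]
      have := pvSplitEq_append p [] (hno p (by simp))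
      simpa [pvConsHead, pvSplitEq] using this
    | cons q qs =>
      rw [PySem.Chars.join_cons_cons, List.append_assoc]
      rw [pvSplitEq_append p _ (hno p (by simp))]
      have : pvSplitEq ('=' :: PySem.Chars.join ['='] (q :: qs))
          = [] :: pvSplitEq (PySem.Chars.join ['='] (q :: qs)) := by
        simp [pvSplitEq]
      rw [List.singleton_append, this, ih (by simp) (fun x hx => hno x (by simp [hx]))]
      simp [pvConsHead]

theorem splitOn_go_eq (fuel : Nat) : ∀ (l cur : List Char) (acc : List (List Char)),
    l.length < fuel →
    PySem.Chars.splitOn.go ['='] fuel l cur acc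
      = acc.reverse ++ pvConsHead cur.reverse (pvSplitEq l) := by
  induction fuel with
  | zero => intro l cur acc h; exact absurd h (Nat.not_lt_zero _)
  | succ fuel ih =>
    intro l cur acc h
    cases l with
    | nil =>
      simp [PySem.Chars.splitOn.go, pvSplitEq, pvConsHead]
    | cons c rest =>
      rw [PySem.Chars.splitOn.go]
      by_cases hc : c = '='
      · subst hc
        have hpre : List.isPrefixOf ['='] ('=' :: rest) = true := by simp [List.isPrefixOf]
        rw [if_pos hpre]
        simp only [List.length_cons] at h
        rw [ih _ _ _ (by simpa using Nat.lt_of_succ_lt_succ h)]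
        rcases hs : pvSplitEq rest with _ | ⟨x, xs⟩
        · exact absurd hs (pvSplitEq_ne_nil rest)
        · simp [pvSplitEq, pvConsHead, hs]
      · have hpre : List.isPrefixOf ['='] (c :: rest) = false := by
          simp [List.isPrefixOf]
          exact fun hh => absurd hh.symm hc
        rw [if_neg (by simp [hpre])]
        simp only [List.length_cons] at h
        rw [ih _ _ _ (by omega)]
        rcases hs : pvSplitEq rest with _ | ⟨x, xs⟩
        · exact absurd hs (pvSplitEq_ne_nil rest)
        · simp [pvSplitEq, pvConsHead, hs, if_neg hc]

theorem splitOn_eq_pvSplitEq (cs : List Char) :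
    PySem.Chars.splitOn cs ['='] = pvSplitEq cs := by
  show PySem.Chars.splitOn.go _ _ _ _ _ = _
  rw [splitOn_go_eq (cs.length + 1) cs [] [] (by omega)]
  rcases hs : pvSplitEq cs with _ | ⟨x, xs⟩
  · exact absurd hs (pvSplitEq_ne_nil cs)
  · simp [pvConsHead]

theorem splitOnMax_go_zero (fuel : Nat) (l cur : List Char) (acc : List (List Char)) :
    PySem.Chars.splitOnMax.go ['='] fuel 0 l cur acc = ((cur.reverse ++ l) :: acc).reverse := by
  cases fuel with
  | zero => rw [PySem.Chars.splitOnMax.go]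
  | succ fuel =>
    cases l with
    | nil => rw [PySem.Chars.splitOnMax.go] <;> simp
    | cons c rest => rw [PySem.Chars.splitOnMax.go]; simp

theorem splitOnMax_go_one (fuel : Nat) : ∀ (l cur : List Char) (acc : List (List Char)),
    l.length < fuel →
    PySem.Chars.splitOnMax.go ['='] fuel 1 l cur acc
      = acc.reverse ++
        (match pvSplitEq l with
         | [x] => [cur.reverse ++ x]
         | x :: xs => [cur.reverse ++ x, PySem.Chars.join ['='] xs]
         | [] => []) := by
  induction fuel with
  | zero => intro l cur acc h; exact absurd h (Nat.not_lt_zero _)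
  | succ fuel ih =>
    intro l cur acc h
    cases l with
    | nil =>
      rw [PySem.Chars.splitOnMax.go] <;> simp [pvSplitEq]
    | cons c rest =>
      rw [PySem.Chars.splitOnMax.go]
      rw [if_neg (by omega)]
      by_cases hc : c = '='
      · subst hc
        have hpre : List.isPrefixOf ['='] ('=' :: rest) = true := by simp [List.isPrefixOf]
        rw [if_pos hpre]
        simp only [List.length_cons] at h
        show PySem.Chars.splitOnMax.go ['='] fuel 0 rest [] _ = _
        rw [splitOnMax_go_zero]
        rcases hs : pvSplitEq rest with _ | ⟨x, xs⟩
        · exact absurd hs (pvSplitEq_ne_nil rest)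
        · simp only [pvSplitEq, hs]
          have hj : PySem.Chars.join ['='] (x :: xs) = rest := by
            rw [← hs]; exact joinEq_pvSplitEq rest
          simp [hj]
      · have hpre : List.isPrefixOf ['='] (c :: rest) = false := by
          simp [List.isPrefixOf]
          exact fun hh => absurd hh.symm hc
        rw [if_neg (by simp [hpre])]
        simp only [List.length_cons] at h
        rw [ih _ _ _ (by omega)]
        rcases hs : pvSplitEq rest with _ | ⟨x, xs⟩
        · exact absurd hs (pvSplitEq_ne_nil rest)
        · simp only [pvSplitEq, if_neg hc, hs]
          cases xs <;> simp

theorem splitOnMax_one_eq (cs : List Char) :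
    PySem.Chars.splitOnMax cs ['='] 1 =
      match pvSplitEq cs with
      | [x] => [x]
      | x :: xs => [x, PySem.Chars.join ['='] xs]
      | [] => [] := by
  have : PySem.Chars.splitOnMax cs ['='] 1
      = PySem.Chars.splitOnMax.go ['='] (cs.length + 1) (1:Int).toNat cs [] [] := by
    rw [PySem.Chars.splitOnMax, if_neg (by norm_num)]
  rw [this]
  show PySem.Chars.splitOnMax.go ['='] (cs.length + 1) 1 cs [] [] = _
  rw [splitOnMax_go_one (cs.length + 1) cs [] [] (by omega)]
  rcases hs : pvSplitEq cs with _ | ⟨x, xs⟩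
  · exact absurd hs (pvSplitEq_ne_nil cs)
  · cases xs <;> simp

theorem isIn_eq_mem (cs : List Char) :
    PySem.Chars.isIn ['='] cs = cs.contains '=' := by
  by_cases h : '=' ∈ cs
  · rw [(PySem.Chars.isIn_iff_infix _ _).2 ((List.singleton_infix_iff _ _).2 h)]
    simp [h]
  · have : PySem.Chars.isIn ['='] cs = false := by
      rw [PySem.Chars.isIn_eq_false_iff _ _]
      exact fun hi => h ((List.singleton_infix_iff _ _).1 hi)
    simp [this, h]

theorem endswith_space_eq (l : List Char) :
    PySem.Chars.endswith l [' '] = (l.getLast? == some ' ') := by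
  by_cases h : [' '] <:+ l
  · rw [(PySem.Chars.endswith_iff _ _).2 h]
    obtain ⟨t, ht⟩ := h
    subst ht
    simp
  · have : PySem.Chars.endswith l [' '] = false := by
      cases he : PySem.Chars.endswith l [' ']
      · rfl
      · exact absurd ((PySem.Chars.endswith_iff _ _).1 he) h
    rw [this]
    cases hg : l.getLast? with
    | none => simp
    | some c =>
      by_cases hc : c = ' '
      · subst hc
        obtain ⟨l', hl'⟩ := List.getLast?_eq_some_iff.1 hg
        exact absurd ⟨l', hl'.symm⟩ h
      · simp [hc]

theorem startswith_space_eq (l : List Char) :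
    PySem.Chars.startswith l [' '] = (l.head? == some ' ') := by
  cases l with
  | nil => simp [PySem.Chars.startswith]
  | cons c cs =>
    by_cases hc : c = ' '
    · subst hc
      rw [show PySem.Chars.startswith (' ' :: cs) [' '] = true from
        (PySem.Chars.startswith_iff _ _).2 ⟨cs, rfl⟩]
      simp
    · have : PySem.Chars.startswith (c :: cs) [' '] = false := by
        cases he : PySem.Chars.startswith (c :: cs) [' ']
        · rfl
        · obtain ⟨t, ht⟩ := (PySem.Chars.startswith_iff _ _).1 he
          simp at ht
          exact absurd ht.1.symm hc
      simp [this, hc]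

theorem pyGet?_zero (l : List Char) : PySem.List.pyGet? l 0 = l.head? := by
  cases l <;> simp [PySem.List.pyGet?, PySem.List.pyIdx?]

theorem pyGet?_neg_one (l : List Char) : PySem.List.pyGet? l (-1) = l.getLast? := by
  cases l with
  | nil => simp [PySem.List.pyGet?, PySem.List.pyIdx?]
  | cons c cs =>
    simp [PySem.List.pyGet?, PySem.List.pyIdx?]
    rw [List.getLast?_eq_getElem?, List.getElem?_eq_getElem (by simp)]
    simp
    rfl

theorem joinEq_cons (nxt : List Char) (rest : List (List Char)) (h : rest ≠ []) :
    PySem.Chars.join ['='] (nxt :: rest) = nxt ++ '=' :: PySem.Chars.join ['='] rest := by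
  cases rest with
  | nil => simp at h
  | cons q qs => rw [PySem.Chars.join_cons_cons]; simp

theorem joinEq_append_singleton (l : List (List Char)) (x : List Char) (h : l ≠ []) :
    PySem.Chars.join ['='] (l ++ [x]) = PySem.Chars.join ['='] l ++ '=' :: x := by
  induction l with
  | nil => simp at h
  | cons p ps ih =>
    cases ps with
    | nil => simp [PySem.Chars.join_cons_cons, PySem.Chars.join_singleton]
    | cons q qs =>
      rw [List.cons_append, joinEq_cons _ _ (by simp), ih (by simp),
          joinEq_cons _ (q :: qs) (by simp)]
      simp

theorem joinEq_ne_nil_of_two (x y : List Char) (ys : List (List Char)) :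
    PySem.Chars.join ['='] (x :: y :: ys) ≠ [] := by
  rw [joinEq_cons _ _ (by simp)]
  simp

theorem length_le_joinEq (ps : List (List Char)) (h : ps ≠ []) :
    ps.length ≤ (PySem.Chars.join ['='] ps).length + 1 := by
  induction ps with
  | nil => simp
  | cons p rest ih =>
    cases rest with
    | nil => simp
    | cons q qs =>
      rw [joinEq_cons _ _ (by simp)]
      have := ih (by simp)
      simp only [List.length_cons, List.length_append] at *
      omega

theorem endswith_joinEq_append (l : List (List Char)) (x : List Char) :
    PySem.Chars.endswith (PySem.Chars.join ['='] (l ++ [x])) [' ']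
      = PySem.Chars.endswith x [' '] := by
  cases l with
  | nil => simp [PySem.Chars.join_singleton]
  | cons p ps =>
    rw [joinEq_append_singleton _ _ (by simp), endswith_space_eq, endswith_space_eq]
    cases x with
    | nil => simp
    | cons c cs =>
      rw [List.getLast?_append_of_ne_nil _ (l₂ := '=' :: c :: cs) (by simp)]
      rw [show ('=' :: c :: cs).getLast? = (c :: cs).getLast? from by
        simp [List.getLast?_cons_cons]]

theorem splitOnMax_join (ps : List (List Char)) (hno : ∀ p ∈ ps, '=' ∉ p)
    (nxt : List Char) (rest : List (List Char)) (hps : ps = nxt :: rest) (hr : rest ≠ []) :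
    PySem.Chars.splitOnMax (PySem.Chars.join ['='] ps) ['='] 1
      = [nxt, PySem.Chars.join ['='] rest] := by
  subst hps
  rw [splitOnMax_one_eq, pvSplitEq_join _ (by simp) hno]
  cases rest with
  | nil => simp at hr
  | cons q qs => simp

theorem contains_join (nxt : List Char) (rest : List (List Char))
    (hno : ∀ p ∈ nxt :: rest, '=' ∉ p) :
    (PySem.Chars.join ['='] (nxt :: rest)).contains '=' = decide (rest ≠ []) := by
  cases rest with
  | nil =>
    rw [PySem.Chars.join_singleton]
    simp only [decide_eq_false_iff_not, List.contains_eq_mem]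
    simp [hno nxt (by simp)]
  | cons q qs =>
    rw [joinEq_cons _ _ (by simp)]
    simp

theorem pvMain (ps : List (List Char)) : ∀ (seg : List Char)
    (f : PySem.Dict (List Char) (List Char)) (k : List Char) (fu1 fu2 : Nat),
    ps ≠ [] → (∀ p ∈ ps, '=' ∉ p) → pvOk seg ps →
    ps.length ≤ fu1 → ps.length ≤ fu2 →
    (match pvInnerA fu1 seg (PySem.Chars.join ['='] ps) with
     | some (v2, r2) =>
       (match pvRsplit1 v2 with
        | [a, b] => pvLoopA fu2 (f.insert k a) b r2
        | _ => none)
     | none => none)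
    = pvGoB f k seg ps := by
  induction ps with
  | nil => intro _ _ _ _ _ h; simp at h
  | cons nxt rest ih =>
    intro seg f k fu1 fu2 _ hno hOk hfu1 hfu2
    obtain ⟨hseg, hOk2⟩ := hOk
    obtain ⟨fu1', rfl⟩ : ∃ m, fu1 = m + 1 := ⟨fu1 - 1, by simp at hfu1; omega⟩
    obtain ⟨fu2', rfl⟩ : ∃ m, fu2 = m + 1 := ⟨fu2 - 1, by simp at hfu2; omega⟩
    have hfu1' : rest.length ≤ fu1' := by simp only [List.length_cons] at hfu1; omega
    have hfu2' : rest.length ≤ fu2' := by simp only [List.length_cons] at hfu2; omega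
    by_cases hE : PySem.Chars.endswith seg [' ']
    · -- merge via value_[-1] == ' '
      rw [if_pos hE] at hOk2
      obtain ⟨hrest, hOk3⟩ := hOk2
      have hc : PySem.List.pyGet? seg (-1) = some ' ' := by
        rw [pyGet?_neg_one]
        rw [endswith_space_eq] at hE
        simpa using hE
      have hsplit := splitOnMax_join (nxt :: rest) hno nxt rest rfl hrest
      simp only [pvInnerA, hc, hsplit, reduceIte, decide_true]
      rw [ih (seg ++ '=' :: nxt) f k fu1' (fu2'+1) hrest
        (fun p hp => hno p (by simp [hp])) hOk3 hfu1' (by omega)]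
      rw [pvGoB, if_pos (by simp [hE])]
    · -- value_[-1] != ' '
      rw [if_neg hE] at hOk2
      obtain ⟨hne, hOk3⟩ := hOk2
      have hcl : ∃ c, PySem.List.pyGet? seg (-1) = some c ∧ c ≠ ' ' := by
        rw [pyGet?_neg_one]
        rcases hg : seg.getLast? with _ | c
        · exact absurd (List.getLast?_eq_none_iff.1 hg) hseg
        · refine ⟨c, rfl, ?_⟩
          rw [endswith_space_eq, hg] at hE
          simpa using hE
      obtain ⟨c, hc, hcsp⟩ := hcl
      by_cases hS : PySem.Chars.startswith nxt [' ']
      · -- merge via remain[0] == ' '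
        rw [if_pos hS] at hOk3
        obtain ⟨hrest, hOk4⟩ := hOk3
        have hnxt : ∃ t, nxt = ' ' :: t := by
          rw [startswith_space_eq] at hS
          cases nxt with
          | nil => simp at hS
          | cons a t => simp at hS; exact ⟨t, by simp [hS]⟩
        obtain ⟨t, hte⟩ := hnxt
        have hhead : PySem.List.pyGet? (PySem.Chars.join ['='] (nxt :: rest)) 0 = some ' ' := by
          rw [pyGet?_zero, joinEq_cons _ _ hrest, hte]
          simp
        have hsplit := splitOnMax_join (nxt :: rest) hno nxt rest rfl hrest
        simp only [pvInnerA, hc, if_neg hcsp, hhead, hsplit, reduceIte, Char.reduceEq, decide_true]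
        rw [ih (seg ++ '=' :: nxt) f k fu1' (fu2'+1) hrest
          (fun p hp => hno p (by simp [hp])) hOk4 hfu1' (by omega)]
        rw [pvGoB, if_pos (by simp [hS])]
      · -- separator
        rw [if_neg hS] at hOk3
        obtain ⟨hrs, hOkn⟩ := hOk3
        have hhead : ∃ c2, PySem.List.pyGet? (PySem.Chars.join ['='] (nxt :: rest)) 0 = some c2
            ∧ c2 ≠ ' ' := by
          rw [pyGet?_zero]
          cases hnx : nxt with
          | cons a t =>
            have ha : a ≠ ' ' := by
              rw [startswith_space_eq, hnx] at hS; simpa using hS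
            cases rest with
            | nil => exact ⟨a, by simp [PySem.Chars.join_singleton], ha⟩
            | cons q qs =>
              refine ⟨a, ?_, ha⟩
              rw [joinEq_cons _ _ (by simp)]
              simp
          | nil =>
            have hrest : rest ≠ [] := by
              rcases hne with h | h
              · exact absurd hnx h
              · exact h
            refine ⟨'=', ?_, by decide⟩
            rw [joinEq_cons _ _ hrest]
            simp
        obtain ⟨c2, hc2, hc2sp⟩ := hhead
        have hab : ∃ a b, pvRsplit1 seg = [a, b] := by
          rcases hr : pvRsplit1 seg with _ | ⟨a, _ | ⟨b, _ | _⟩⟩ <;> rw [hr] at hrs <;> simp at hrs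
          exact ⟨a, b, rfl⟩
        obtain ⟨a, b, hab⟩ := hab
        simp only [pvInnerA, hc, if_neg hcsp, hc2, reduceIte, decide_eq_true_eq, hab]
        rw [show (decide (c2 = ' ')) = false from by simp [hc2sp]]
        simp only [hab]
        -- LHS is now pvLoopA (fu2'+1) (f.insert k a) b (join (nxt::rest))
        have hIn : PySem.Chars.isIn ['='] (PySem.Chars.join ['='] (nxt :: rest))
            = decide (rest ≠ []) := by
          rw [isIn_eq_mem, contains_join nxt rest hno]
        cases hrest : rest with
        | nil =>
          subst hrest
          simp only [pvLoopA, hIn]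
          rw [if_neg (by simp)]
          simp [pvGoB, hE, hS, hab]
        | cons q qs =>
          have hrne : rest ≠ [] := by simp [hrest]
          rw [← hrest] at *
          have hsplit := splitOnMax_join (nxt :: rest) hno nxt rest rfl hrne
          simp only [pvLoopA, hIn, hsplit]
          rw [if_pos (by simp [hrne])]
          rw [ih nxt (f.insert k a) b ((PySem.Chars.join ['='] rest).length + 1) fu2' hrne
            (fun p hp => hno p (by simp [hp])) hOkn
            (le_trans (length_le_joinEq rest hrne) (by omega)) hfu2']
          rw [pvGoB, if_neg (by simp [hE, hS]), hab]

theorem getD_eq_getElem' (ps : List (List Char)) (i : Nat) (h : i < ps.length) :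
    ps.getD i [] = ps[i] := by
  rw [List.getD_eq_getElem?_getD, List.getElem?_eq_getElem h]; rfl

theorem segSingle (ps : List (List Char)) (s : Nat) (h : s < ps.length) :
    pvSeg ps s s = ps.getD s [] := by
  unfold pvSeg
  rw [List.drop_eq_getElem_cons h, show s + 1 - s = 1 from by omega, List.take_succ_cons,
    List.take_zero, PySem.Chars.join_singleton, getD_eq_getElem' ps s h]

theorem segChunk (ps : List (List Char)) (s k : Nat) (hsk : s ≤ k) (hk : k < ps.length) :
    (ps.drop s).take (k+1-s) = (ps.drop s).take (k-s) ++ [ps.getD k []] := by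
  have h1 : k + 1 - s = (k - s) + 1 := by omega
  rw [h1, List.take_succ]
  have h2 : (ps.drop s)[k-s]? = some ps[k] := by
    rw [List.getElem?_drop, show s + (k - s) = k from by omega,
      List.getElem?_eq_getElem hk]
  rw [h2, getD_eq_getElem' ps k hk]
  rfl

theorem segEnds (ps : List (List Char)) (s k : Nat) (hsk : s ≤ k) (hk : k < ps.length) :
    PySem.Chars.endswith (pvSeg ps s k) [' ']
      = PySem.Chars.endswith (ps.getD k []) [' '] := by
  unfold pvSeg
  rw [segChunk ps s k hsk hk, endswith_joinEq_append]

theorem segExtend (ps : List (List Char)) (s k : Nat) (hsk : s ≤ k) (hk : k + 1 < ps.length) :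
    pvSeg ps s (k+1) = pvSeg ps s k ++ '=' :: ps.getD (k+1) [] := by
  unfold pvSeg
  rw [segChunk ps s (k+1) (by omega) hk]
  have h1 : k + 1 - s = (k - s) + 1 := by omega
  rw [h1]
  rw [joinEq_append_singleton _ _ ?hne]
  case hne =>
    have : (ps.drop s).length = ps.length - s := by simp
    intro hcon
    have := congrArg List.length hcon
    simp at this
    omega

theorem segNe (ps : List (List Char)) (s k : Nat) (hsk : s ≤ k) (hk : k < ps.length)
    (hs : ps.getD s [] ≠ []) : pvSeg ps s k ≠ [] := by
  rcases Nat.eq_or_lt_of_le hsk with rfl | hlt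
  · rw [segSingle ps s hk]; exact hs
  · unfold pvSeg
    have hlen : ((ps.drop s).take (k+1-s)).length = k+1-s := by
      simp; omega
    rcases hc : (ps.drop s).take (k+1-s) with _ | ⟨x, _ | ⟨y, ys⟩⟩
    · rw [hc] at hlen; simp at hlen; omega
    · rw [hc] at hlen; simp at hlen; omega
    · exact joinEq_ne_nil_of_two x y ys

theorem okGen (ps : List (List Char)) (n : Nat) (hn : n = ps.length) (h2 : 2 ≤ n)
    (H0 : ps.getD (n-1) [] ≠ [])
    (H1 : pvBnd ps (n-2) = false)
    (H2 : ∀ s, s < n-1 → pvStart ps s = true → ps.getD s [] ≠ [])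
    (H3 : ∀ s k, s < n-1 → k < n-1 → pvStart ps s = true → s ≤ k →
          (∀ d, d < k - s → pvBnd ps (s+d) = true) → pvBnd ps k = false →
          (pvRsplit1 (pvSeg ps s k)).length = 2) :
    ∀ (t s k : Nat), n - 1 - k ≤ t → s ≤ k → k ≤ n-1 → pvStart ps s = true →
    (∀ d, d < k - s → pvBnd ps (s+d) = true) →
    pvOk (pvSeg ps s k) (ps.drop (k+1)) := by
  intro t
  induction t with
  | zero =>
    intro s k ht hsk hk hst hch
    have : k = n - 1 := by omega
    subst this
    have : ps.drop (n-1+1) = [] := by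
      apply List.drop_eq_nil_of_le; omega
    rw [this]
    trivial
  | succ t iht =>
    intro s k ht hsk hk hst hch
    rcases Nat.eq_or_lt_of_le hk with hkeq | hklt
    · subst hkeq
      have : ps.drop (n-1+1) = [] := by apply List.drop_eq_nil_of_le; omega
      rw [this]; trivial
    · -- k ≤ n-2
      have hk2 : k ≤ n - 2 := by omega
      have hkn : k + 1 < ps.length := by omega
      rw [List.drop_eq_getElem_cons (l := ps) (i := k+1) (by omega)]
      have hgetD : ps[k+1] = ps.getD (k+1) [] := (getD_eq_getElem' ps (k+1) (by omega)).symm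
      rw [hgetD]
      have hsegne : pvSeg ps s k ≠ [] :=
        segNe ps s k hsk (by omega) (H2 s (by omega) hst)
      have hends := segEnds ps s k hsk (by omega)
      constructor
      · exact hsegne
      · by_cases hB : pvBnd ps k = true
        · -- merge
          have hkne : k ≠ n - 2 := by
            intro h; rw [h] at hB; rw [H1] at hB; exact absurd hB (by simp)
          have hk3 : k + 2 < n := by omega
          have hrest : ps.drop (k+2) ≠ [] := by
            intro hcon
            have := congrArg List.length hcon
            simp at this
            omega
          have hrec : pvOk (pvSeg ps s k ++ '=' :: ps.getD (k+1) []) (ps.drop (k+2)) := by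
            rw [← segExtend ps s k hsk (by omega)]
            have := iht s (k+1) (by omega) (by omega) (by omega) hst ?ch
            · simpa using this
            case ch =>
              intro d hd
              rcases Nat.lt_or_ge d (k - s) with h | h
              · exact hch d h
              · have : d = k - s := by omega
                subst this
                have : s + (k - s) = k := by omega
                rw [this]; exact hB
          unfold pvBnd pvCond at hB
          simp only [Bool.or_eq_true] at hB
          split_ifs with h1 h2
          · exact ⟨hrest, hrec⟩
          · exact ⟨Or.inr hrest, hrest, hrec⟩
          · exfalso
            rw [hends] at h1
            rcases hB with hB1 | hB2
            · exact h1 hB1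
            · exact h2 hB2
        · -- separator
          have hBf : pvBnd ps k = false := by simpa using hB
          have hBf' := hBf
          unfold pvBnd pvCond at hBf'
          have hBe : PySem.Chars.endswith (ps.getD k []) [' '] = false := by
            rcases Bool.or_eq_false_iff.1 hBf' with ⟨h1, _⟩; exact h1
          have hBs : PySem.Chars.startswith (ps.getD (k+1) []) [' '] = false := by
            rcases Bool.or_eq_false_iff.1 hBf' with ⟨_, h2⟩; exact h2
          rw [if_neg (by rw [hends, hBe]; simp)]
          refine ⟨?_, ?_⟩
          · -- nxt ≠ [] ∨ rest ≠ []
            rcases Nat.eq_or_lt_of_le hk2 with hkeq2 | hklt2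
            · left
              rw [show k + 1 = n - 1 from by omega]
              exact H0
            · right
              intro hcon
              have := congrArg List.length hcon
              simp at this
              omega
          · rw [if_neg (by rw [hBs]; simp)]
            refine ⟨H3 s k (by omega) (by omega) hst hsk
              (fun d hd => hch d hd) hBf, ?_⟩
            have := iht (k+1) (k+1) (by omega) le_rfl (by omega) ?st (by omega)
            · rw [segSingle ps (k+1) (by omega)] at this
              simpa using this
            case st =>
              unfold pvStart
              rw [show k + 1 - 1 = k from by omega, hBf]
              simp

theorem pvOk_of_pre (ps : List (List Char)) (h2 : 2 ≤ ps.length)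
    (hpre : pvPreParts ps = true) :
    pvOk (ps.getD 0 []) (ps.drop 1) := by
  unfold pvPreParts at hpre
  have hne1 : (ps.length == 1) = false := by
    simp only [beq_eq_false_iff_ne, ne_eq]
    omega
  rw [hne1] at hpre
  simp only [Bool.false_or, Bool.and_eq_true, List.all_eq_true, List.mem_range,
    Bool.or_eq_true, Bool.not_eq_eq_eq_not, Bool.not_true, beq_iff_eq,
    Bool.not_eq_true', List.isEmpty_eq_false_iff] at hpre
  obtain ⟨⟨⟨H0, H1⟩, H2⟩, H3⟩ := hpre
  have hok := okGen ps ps.length rfl h2 H0 H1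
    (fun s hs hst => by
      rcases H2 s hs with h | h
      · rw [hst] at h; simp at h
      · exact h)
    (fun s k hs hk hst hsk hch hbnd => by
      rcases H3 s hs k hk with h | h
      · exfalso
        have : ((pvStart ps s && decide (s ≤ k) && (List.range (k - s)).all fun d => pvBnd ps (s + d))
            && !pvBnd ps k) = true := by
          simp only [Bool.and_eq_true, List.all_eq_true, List.mem_range]
          exact ⟨⟨⟨hst, by simpa using hsk⟩, fun d hd => hch d hd⟩, by simp [hbnd]⟩
        rw [h] at this
        exact absurd this (by simp)
      · simpa using h)
    ps.length 0 0 (by omega) le_rfl (by omega) (by simp [pvStart]) (by omega)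
  rwa [segSingle ps 0 (by omega)] at hok

theorem pvLoop_eq_goB (remain : List Char) (f : PySem.Dict (List Char) (List Char))
    (k : List Char) (fu : Nat) (hfu : remain.length ≤ fu)
    (hpre : pvPreParts (pvSplitEq remain) = true) :
    pvLoopA (fu+1) f k remain
      = pvGoB f k ((pvSplitEq remain).getD 0 []) ((pvSplitEq remain).drop 1) := by
  have hjoin := joinEq_pvSplitEq remain
  have hnil := pvSplitEq_ne_nil remain
  have hno := pvSplitEq_no_eq remain
  rcases hps : pvSplitEq remain with _ | ⟨p, tail⟩
  · exact absurd hps hnil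
  · rw [hps] at hjoin hno
    have hIn : PySem.Chars.isIn ['='] remain = decide (tail ≠ []) := by
      rw [← hjoin, isIn_eq_mem, contains_join p tail hno]
    cases tail with
    | nil =>
      rw [pvLoopA, hIn, if_neg (by simp)]
      rw [PySem.Chars.join_singleton] at hjoin
      simp [pvGoB, hjoin]
    | cons q qs =>
      have htne : (q :: qs : List (List Char)) ≠ [] := by simp
      have hsplit : PySem.Chars.splitOnMax remain ['='] 1
          = [p, PySem.Chars.join ['='] (q :: qs)] := by
        rw [← hjoin]
        exact splitOnMax_join (p :: q :: qs) hno p (q :: qs) rfl htne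
      rw [pvLoopA, hIn, if_pos (by simp), hsplit]
      have hOk : pvOk p (q :: qs) := by
        have := pvOk_of_pre (p :: q :: qs) (by simp) (hps ▸ hpre)
        simpa using this
      have hfu2 : (q :: qs : List (List Char)).length ≤ fu := by
        have := length_le_joinEq (p :: q :: qs) (by simp)
        rw [hjoin] at this
        simp only [List.length_cons] at this ⊢
        omega
      have := pvMain (q :: qs) p f k ((PySem.Chars.join ['='] (q :: qs)).length + 1) fu
        htne (fun x hx => hno x (by simp [hx])) hOk
        (le_trans (length_le_joinEq _ htne) (by omega)) hfu2
      simpa using this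

-- ===== VERDICT (by name: the statement is the Claim_ definition above) =====
theorem assign_unipprt_fa_features_spec : Claim_equal_assign_unipprt_fa_features := by
  intro headline hdom hpre
  unfold Spec_assign_unipprt_fa_features
  unfold Pre_assign_unipprt_fa_features at hpre
  unfold assign_unipprt_fa_features assign_unipprt_fa_features_alt
  simp only at hpre ⊢
  rcases hsm : PySem.Chars.split₀Max (PySem.Chars.strip
      (if PySem.Chars.startswith headline.toList ['>']
       then PySem.List.slice headline.toList (some 1) none else headline.toList)) 1 with
    _ | ⟨seqid, _ | ⟨remain, _ | _⟩⟩ <;> rw [hsm] at hpre <;> dsimp only at hpre ⊢ <;>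
      try simp only [Bool.false_eq_true] at hpre
  rw [splitOn_eq_pvSplitEq]
  have hloop := pvLoop_eq_goB remain
      ((PySem.Dict.mk []).insert "id".toList seqid) "desc".toList remain.length le_rfl hpre
  rcases hps : pvSplitEq remain with _ | ⟨p, tail⟩
  · exact absurd hps (pvSplitEq_ne_nil remain)
  · rw [hps] at hloop
    simp only [List.getD_cons_zero, List.drop_succ_cons, List.drop_zero] at hloop
    rw [hloop]
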